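-- pv_equiv track=rewrite | github.com/apundhir/license-compliance-checker | src/lcc/detection/python.py | _compute_dependency_depths
-- ===== SOURCE A (Python) =====
-- def _compute_dependency_depths(
--
--     direct_names: set[str],
--     dep_graph: dict[str, list[str]],
-- ) -> tuple[dict[str, int], dict[str, list[str]]]:
--     """BFS from direct dependencies to compute depth and parent_packages."""
--     from collections import deque
--
--     depth_map: dict[str, int] = {}
--     parent_map: dict[str, list[str]] = {}
--
--     # Initialize direct deps at depth 0
--     queue: deque[str] = deque()
--     for name in direct_names:
--         if name in dep_graph or name in direct_names:
--             depth_map[name] = 0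
--             parent_map[name] = []
--             queue.append(name)
--
--     # BFS to discover transitive deps
--     while queue:
--         current = queue.popleft()
--         current_depth = depth_map[current]
--         for child in dep_graph.get(current, []):
--             if child not in depth_map:
--                 depth_map[child] = current_depth + 1
--                 parent_map[child] = [current]
--                 queue.append(child)
--             else:
--                 # Already visited — add parent if not already tracked
--                 if current not in parent_map.get(child, []):
--                     parent_map.setdefault(child, []).append(current)
--
--     return depth_map, parent_map
-- ===== SOURCE B (Python) =====
-- def _compute_dependency_depths(
--     direct_names,
--     dep_graph,
-- ):
--     """Two-pass BFS: pass 1 computes depths and the dequeue order; pass 2 rebuilds parent lists."""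
--     from collections import deque
--
--     depth_map = {}
--     queue = deque()
--     for name in direct_names:
--         if name in dep_graph or name in direct_names:
--             depth_map[name] = 0
--             queue.append(name)
--
--     order = []
--     while queue:
--         current = queue.popleft()
--         order.append(current)
--         current_depth = depth_map[current]
--         for child in dep_graph.get(current, []):
--             if child not in depth_map:
--                 depth_map[child] = current_depth + 1
--                 queue.append(child)
--
--     parent_map = {node: [] for node in order}
--     for node in order:
--         for child in dep_graph.get(node, []):
--             if node not in parent_map[child]:
--                 parent_map[child].append(node)
--
--     return depth_map, parent_map
-- ===== Notes on version B (the rewrite author's own statement) =====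
-- stated objective: alternative
-- what changed: A builds parent lists interleaved inside the BFS loop (discovery branch + setdefault-append); B splits the work into two differently-shaped passes: pass 1 is a BFS that records only depths and the dequeue order, pass 2 initialises every reachable node's parent list and rebuilds all parent lists by replaying the dequeue order over the adjacency lists.
import Mathlib
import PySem

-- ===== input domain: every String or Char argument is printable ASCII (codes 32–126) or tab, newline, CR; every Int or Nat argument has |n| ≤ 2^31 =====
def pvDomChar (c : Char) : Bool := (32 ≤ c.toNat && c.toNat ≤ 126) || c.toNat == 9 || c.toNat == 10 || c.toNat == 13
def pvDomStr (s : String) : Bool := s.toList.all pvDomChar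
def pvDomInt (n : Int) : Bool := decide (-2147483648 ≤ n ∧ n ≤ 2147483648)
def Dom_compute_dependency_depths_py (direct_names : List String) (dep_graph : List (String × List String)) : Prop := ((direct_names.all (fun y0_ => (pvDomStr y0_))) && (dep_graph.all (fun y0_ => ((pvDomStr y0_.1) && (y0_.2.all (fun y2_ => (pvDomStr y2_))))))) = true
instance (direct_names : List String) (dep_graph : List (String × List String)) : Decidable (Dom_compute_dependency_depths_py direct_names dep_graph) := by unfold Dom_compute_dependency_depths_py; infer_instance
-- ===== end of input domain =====

-- B replaces A's interleaved BFS parent bookkeeping by two separate passes (BFS for depths +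
-- dequeue order, then a replay pass rebuilding parent lists); same values, objective: alternative.

-- `dep_graph.get(k, [])` (shared trivial primitive, used by both Pythons verbatim)
def pvGet (dep_graph : List (String × List String)) (k : String) : List String :=
  (PySem.Dict.ofList dep_graph).getD k []

-- `k in dep_graph`
def pvMem (dep_graph : List (String × List String)) (k : String) : Bool :=
  (PySem.Dict.ofList dep_graph).contains k

-- ===== PORT A =====

-- body of A's inner `for child in dep_graph.get(current, [])` loop; state = (depth_map, parent_map, queue)
-- `parent_map.setdefault(child, []).append(current)` is `insert child (getD child [] ++ [current])`:
-- when the key exists this overwrites in place, when missing it appends the new pair — exactly setdefault+append.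
def pvStepA (cd : Int) (current : String)
    (s : PySem.Dict String Int × PySem.Dict String (List String) × List String) (child : String) :
    PySem.Dict String Int × PySem.Dict String (List String) × List String :=
  if s.1.contains child = false then
    (s.1.insert child (cd + 1), s.2.1.insert child [current], s.2.2 ++ [child])
  else if (s.2.1.getD child []).contains current then s
  else (s.1, s.2.1.insert child (s.2.1.getD child [] ++ [current]), s.2.2)

-- A's `while queue:` loop; fuel only totalises it (never exhausted on real runs, see fuel note below).
-- `depth_map[current]` never raises (every queued node is a key); ported as getD with an unused default.
def pvALoop (dep_graph : List (String × List String)) :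
    Nat → PySem.Dict String Int → PySem.Dict String (List String) → List String →
    PySem.Dict String Int × PySem.Dict String (List String)
  | 0, d, p, _ => (d, p)
  | _ + 1, d, p, [] => (d, p)
  | f + 1, d, p, current :: rest =>
    let s := (pvGet dep_graph current).foldl (pvStepA (d.getD current 0) current) (d, p, rest)
    pvALoop dep_graph f s.1 s.2.1 s.2.2

-- fuel = an upper bound on the total number of dequeues: every enqueue is either a direct name or a
-- fresh discovery (one per distinct child occurrence in the graph), so the loop always ends with fuel left.
def compute_dependency_depths_py (direct_names : List String) (dep_graph : List (String × List String)) :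
    (List (String × Int)) × (List (String × List String)) :=
  let init := direct_names.foldl
    (fun (s : PySem.Dict String Int × PySem.Dict String (List String) × List String) name =>
      if pvMem dep_graph name || direct_names.contains name then
        (s.1.insert name 0, s.2.1.insert name [], s.2.2 ++ [name])
      else s)
    (PySem.Dict.empty, PySem.Dict.empty, [])
  let fuel := direct_names.length + dep_graph.foldl (fun a pr => a + 1 + pr.2.length) 0
  let r := pvALoop dep_graph fuel init.1 init.2.1 init.2.2
  (r.1.items, r.2.items)

-- ===== PORT B =====

-- body of B's pass-1 inner loop; state = (depth_map, queue)
def pvStepB (cd : Int) (s : PySem.Dict String Int × List String) (child : String) :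
    PySem.Dict String Int × List String :=
  if s.1.contains child = false then (s.1.insert child (cd + 1), s.2 ++ [child]) else s

-- B's pass-1 `while queue:` loop, recording the dequeue order (same fuel note as for A)
def pvBLoop (dep_graph : List (String × List String)) :
    Nat → PySem.Dict String Int → List String → List String →
    PySem.Dict String Int × List String
  | 0, d, o, _ => (d, o)
  | _ + 1, d, o, [] => (d, o)
  | f + 1, d, o, current :: rest =>
    let s := (pvGet dep_graph current).foldl (pvStepB (d.getD current 0)) (d, rest)
    pvBLoop dep_graph f s.1 (o ++ [current]) s.2

-- `parent_map = {node: [] for node in order}`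
def pvInitPar (order : List String) : PySem.Dict String (List String) :=
  order.foldl (fun p n => p.insert n []) PySem.Dict.empty

-- body of B's pass-2 inner loop: `if node not in parent_map[child]: parent_map[child].append(node)`
-- (`parent_map[child]` never raises: every child is reachable hence in `order`; ported as getD)
def pvParStep (node : String) (p : PySem.Dict String (List String)) (child : String) :
    PySem.Dict String (List String) :=
  if (p.getD child []).contains node then p else p.insert child (p.getD child [] ++ [node])

def pvAddPar (dep_graph : List (String × List String)) (p : PySem.Dict String (List String))
    (node : String) : PySem.Dict String (List String) :=
  (pvGet dep_graph node).foldl (pvParStep node) p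

def compute_dependency_depths_py_alt (direct_names : List String) (dep_graph : List (String × List String)) :
    (List (String × Int)) × (List (String × List String)) :=
  let init := direct_names.foldl
    (fun (s : PySem.Dict String Int × List String) name =>
      if pvMem dep_graph name || direct_names.contains name then
        (s.1.insert name 0, s.2 ++ [name])
      else s)
    (PySem.Dict.empty, [])
  let fuel := direct_names.length + dep_graph.foldl (fun a pr => a + 1 + pr.2.length) 0
  let r := pvBLoop dep_graph fuel init.1 [] init.2
  (r.1.items, (r.2.foldl (pvAddPar dep_graph) (pvInitPar r.2)).items)

-- ===== PRECONDITION & SPEC =====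
def Spec_compute_dependency_depths_py (direct_names : List String) (dep_graph : List (String × List String)) (out : (List (String × Int)) × (List (String × List String))) : Prop := out = compute_dependency_depths_py_alt direct_names dep_graph
instance (direct_names : List String) (dep_graph : List (String × List String)) (out : (List (String × Int)) × (List (String × List String))) : Decidable (Spec_compute_dependency_depths_py direct_names dep_graph out) := by unfold Spec_compute_dependency_depths_py; infer_instance

-- ===== CLAIM (what is proved, stated in full; the proofs are below) =====
def Claim_equal_compute_dependency_depths_py : Prop := ∀ (direct_names : List String) (dep_graph : List (String × List String)), Dom_compute_dependency_depths_py direct_names dep_graph → Spec_compute_dependency_depths_py direct_names dep_graph (compute_dependency_depths_py direct_names dep_graph)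

-- ===== LEMMAS AND PROOFS =====

def pvNewly : List String → (String → Bool) → List String
  | [], _ => []
  | k :: t, m => if m k then pvNewly t m else k :: pvNewly t (fun x => x == k || m x)

lemma pvNewly_fresh (cs : List String) : ∀ (m : String → Bool) (x : String), x ∈ pvNewly cs m →
    m x = false := by
  induction cs with
  | nil => intro m x hx; simp [pvNewly] at hx
  | cons k t ih =>
    intro m x hx
    by_cases hk : m k = true
    · simp [pvNewly, hk] at hx; exact ih m x hx
    · simp only [Bool.not_eq_true] at hk
      simp [pvNewly, hk] at hx
      rcases hx with rfl | hx
      · exact hk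
      · have := ih _ x hx
        simp at this
        exact this.2

lemma pvNewly_sub (cs : List String) : ∀ (m : String → Bool) (x : String), x ∈ pvNewly cs m →
    x ∈ cs := by
  induction cs with
  | nil => intro m x hx; simp [pvNewly] at hx
  | cons k t ih =>
    intro m x hx
    by_cases hk : m k = true
    · simp [pvNewly, hk] at hx; exact List.mem_cons_of_mem _ (ih m x hx)
    · simp only [Bool.not_eq_true] at hk
      simp [pvNewly, hk] at hx
      rcases hx with rfl | hx
      · exact List.mem_cons_self
      · exact List.mem_cons_of_mem _ (ih _ x hx)

lemma pvNewly_nodup (cs : List String) : ∀ (m : String → Bool), (pvNewly cs m).Nodup := by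
  induction cs with
  | nil => intro m; simp [pvNewly]
  | cons k t ih =>
    intro m
    by_cases hk : m k = true
    · simp [pvNewly, hk]; exact ih m
    · simp only [Bool.not_eq_true] at hk
      simp only [pvNewly, hk, if_false]
      refine List.nodup_cons.2 ⟨?_, ih _⟩
      intro hmem
      have := pvNewly_fresh t _ k hmem
      simp at this

lemma pvNewly_covers (cs : List String) : ∀ (m : String → Bool) (x : String), x ∈ cs →
    (m x || (pvNewly cs m).contains x) = true := by
  induction cs with
  | nil => intro m x hx; simp at hx
  | cons k t ih =>
    intro m x hx
    by_cases hk : m k = true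
    · rcases List.mem_cons.1 hx with rfl | hx
      · simp [hk]
      · simpa [pvNewly, hk] using ih m x hx
    · simp only [Bool.not_eq_true] at hk
      simp only [pvNewly, hk, if_false]
      rcases List.mem_cons.1 hx with rfl | hx
      · simp
      · have := ih (fun y => y == k || m y) x hx
        by_cases hxk : x = k
        · subst hxk; simp
        · simp [hxk] at this
          rcases this with h | h
          · simp [h]
          · simp [h]

-- all child occurrences in the graph
def pvAllC (dep_graph : List (String × List String)) : List String := (dep_graph.map Prod.snd).flatten

-- number of still-undiscovered possible children (with the queue length: the BFS potential)
def pvUD (dep_graph : List (String × List String)) (d : PySem.Dict String Int) : Nat :=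
  ((PySem.List.dedup (pvAllC dep_graph)).filter (fun c => d.contains c = false)).length

lemma pvBFold (cd : Int) (cs : List String) : ∀ (d : PySem.Dict String Int) (q : List String),
    (cs.foldl (pvStepB cd) (d, q)).2 = q ++ pvNewly cs (fun x => d.contains x) ∧
    (∀ x, (cs.foldl (pvStepB cd) (d, q)).1.contains x
      = (d.contains x || (pvNewly cs (fun y => d.contains y)).contains x)) := by
  induction cs with
  | nil => intro d q; simp [pvNewly]
  | cons k t ih =>
    intro d q
    by_cases hk : d.contains k = true
    · have hs : pvStepB cd (d, q) k = (d, q) := by simp [pvStepB, hk]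
      simp only [List.foldl_cons, hs, pvNewly, hk, if_true]
      exact ih d q
    · simp only [Bool.not_eq_true] at hk
      have hs : pvStepB cd (d, q) k = (d.insert k (cd + 1), q ++ [k]) := by simp [pvStepB, hk]
      simp only [List.foldl_cons, hs, pvNewly, hk, Bool.false_eq_true, if_false]
      have hc : (fun x => (d.insert k (cd + 1)).contains x) = (fun x => x == k || d.contains x) := by
        funext x; exact PySem.Dict.contains_insert d k x (cd+1)
      obtain ⟨h1, h2⟩ := ih (d.insert k (cd + 1)) (q ++ [k])
      constructor
      · rw [h1, hc]; simp
      · intro x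
        rw [h2 x, PySem.Dict.contains_insert, hc]
        by_cases hxk : x = k
        · subst hxk; simp
        · have : (x == k) = false := by simp [hxk]
          simp [this, hxk]

lemma pvGet?_mk_append_left {ν : Type} (l₁ l₂ : List (String × ν)) (x : String)
    (h : (PySem.Dict.mk l₁).contains x = true) :
    (PySem.Dict.mk (l₁ ++ l₂) : PySem.Dict String ν).get? x = (PySem.Dict.mk l₁).get? x := by
  simp only [PySem.Dict.contains] at h
  simp only [PySem.Dict.get?, List.find?_append]
  rcases List.any_eq_true.1 h with ⟨p, hp, hpx⟩
  have : (List.find? (fun p => p.1 == x) l₁).isSome = true := by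
    exact List.find?_isSome.2 ⟨p, hp, hpx⟩
  rcases Option.isSome_iff_exists.1 this with ⟨v, hv⟩
  simp [hv]

lemma pvGet?_mk_append_right {ν : Type} (l₁ l₂ : List (String × ν)) (x : String)
    (h : (PySem.Dict.mk l₁).contains x = false) :
    (PySem.Dict.mk (l₁ ++ l₂) : PySem.Dict String ν).get? x = (PySem.Dict.mk l₂).get? x := by
  simp only [PySem.Dict.contains] at h
  have : List.find? (fun p => p.1 == x) l₁ = none := by
    rw [List.find?_eq_none]
    intro p hp
    have := List.any_eq_false.1 h p hp
    simpa using this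
  simp [PySem.Dict.get?, List.find?_append, this]

lemma pvContains_foldl_insert {ν : Type} (L : List String) :
    ∀ (P : PySem.Dict String ν) (f : PySem.Dict String ν → String → ν) (x : String),
    (L.foldl (fun p n => p.insert n (f p n)) P).contains x = (P.contains x || decide (x ∈ L)) := by
  induction L with
  | nil => intro P f x; simp
  | cons k t ih =>
    intro P f x
    simp only [List.foldl_cons]
    rw [ih]
    rw [PySem.Dict.contains_insert]
    by_cases hxk : x = k
    · subst hxk; simp
    · have : (x == k) = false := by simp [hxk]
      simp [this, hxk]

lemma pvFoldl_insert_fresh {ν : Type} (new : List String) (v : ν) :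
    ∀ (P : PySem.Dict String ν), (∀ k ∈ new, P.contains k = false) → new.Nodup →
    new.foldl (fun p n => p.insert n v) P = PySem.Dict.mk (P.items ++ new.map (fun k => (k, v))) := by
  induction new with
  | nil => intro P _ _; simp
  | cons k t ih =>
    intro P hfresh hnd
    simp only [List.foldl_cons]
    have hk : P.contains k = false := hfresh k List.mem_cons_self
    have hins : P.insert k v = PySem.Dict.mk (P.items ++ [(k, v)]) := by
      apply PySem.Dict.ext
      rw [PySem.Dict.items_insert_of_not_contains P v hk]
    rw [ih (P.insert k v) ?_ (List.nodup_cons.1 hnd).2]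
    · rw [hins]; simp
    · intro j hj
      rw [PySem.Dict.contains_insert]
      have hjk : (j == k) = false := by
        have := (List.nodup_cons.1 hnd).1
        simp only [beq_eq_false_iff_ne, ne_eq]
        rintro rfl; exact this hj
      simp [hjk, hfresh j (List.mem_cons_of_mem _ hj)]

-- map of the insert-overwrite function is the identity on pair lists avoiding the key
lemma pvMap_overwrite_id {ν : Type} (k : String) (v : ν) (l : List (String × ν))
    (h : ∀ pr ∈ l, (pr.1 == k) = false) :
    l.map (fun p => if (p.1 == k) = true then (k, v) else p) = l := by
  conv_rhs => rw [← List.map_id l]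
  exact List.map_congr_left (fun pr hpr => by simp [h pr hpr])

lemma pvContains_mk_of_items {ν : Type} (p : PySem.Dict String ν) (x : String) :
    (PySem.Dict.mk p.items : PySem.Dict String ν).contains x = p.contains x := rfl

lemma pvNotMem_items {ν : Type} (p : PySem.Dict String ν) (k : String)
    (h : p.contains k = false) : ∀ pr ∈ p.items, (pr.1 == k) = false := by
  intro pr hpr
  have := List.any_eq_false.1 h pr hpr
  simpa using this

lemma pvInner (current : String) (cd : Int) :
    ∀ (cs : List String) (d : PySem.Dict String Int) (p : PySem.Dict String (List String)) (q : List String),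
    (∀ x, p.contains x = d.contains x) →
    ((cs.foldl (pvStepA cd current) (d, p, q)).1 = (cs.foldl (pvStepB cd) (d, q)).1
    ∧ (cs.foldl (pvStepA cd current) (d, p, q)).2.2 = (cs.foldl (pvStepB cd) (d, q)).2
    ∧ cs.foldl (pvParStep current)
        (PySem.Dict.mk (p.items ++ (pvNewly cs (fun x => d.contains x)).map (fun k => (k, ([] : List String)))))
        = (cs.foldl (pvStepA cd current) (d, p, q)).2.1
    ∧ (∀ x, (cs.foldl (pvStepA cd current) (d, p, q)).2.1.contains x
        = (cs.foldl (pvStepA cd current) (d, p, q)).1.contains x)) := by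
  intro cs
  induction cs with
  | nil =>
    intro d p q hpk
    refine ⟨rfl, rfl, by simp [pvNewly], hpk⟩
  | cons k t ih =>
    intro d p q hpk
    by_cases hk : d.contains k = true
    · -- k already discovered
      have hpck : p.contains k = true := by rw [hpk]; exact hk
      have hpend : pvNewly (k :: t) (fun x => d.contains x) = pvNewly t (fun x => d.contains x) := by
        simp [pvNewly, hk]
      have hstepB : pvStepB cd (d, q) k = (d, q) := by simp [pvStepB, hk]
      have hgetPT : (PySem.Dict.mk (p.items ++ (pvNewly t (fun x => d.contains x)).map
          (fun j => (j, ([] : List String))))).getD k [] = p.getD k [] := by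
        simp only [PySem.Dict.getD]
        rw [pvGet?_mk_append_left _ _ k (by rw [pvContains_mk_of_items]; exact hpck)]
      simp only [List.foldl_cons, hstepB, hpend]
      by_cases hcur : (p.getD k []).contains current = true
      · -- both skip
        have hcurm : current ∈ p.getD k [] := by simpa using hcur
        have hstepA : pvStepA cd current (d, p, q) k = (d, p, q) := by
          simp [pvStepA, hk, hcurm]
        have hpar : pvParStep current (PySem.Dict.mk (p.items ++ (pvNewly t (fun x => d.contains x)).map
            (fun j => (j, ([] : List String))))) k
            = PySem.Dict.mk (p.items ++ (pvNewly t (fun x => d.contains x)).map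
            (fun j => (j, ([] : List String)))) := by
          unfold pvParStep
          rw [hgetPT]
          simp [hcurm]
        rw [hstepA, hpar]
        exact ih d p q hpk
      · -- both append current to k's parent list
        have hcur' : (p.getD k []).contains current = false := by
          simpa using hcur
        have hcurm : current ∉ p.getD k [] := by simpa using hcur
        have hstepA : pvStepA cd current (d, p, q) k
            = (d, p.insert k (p.getD k [] ++ [current]), q) := by
          simp [pvStepA, hk, hcurm]
        have hPTc : (PySem.Dict.mk (p.items ++ (pvNewly t (fun x => d.contains x)).map
            (fun j => (j, ([] : List String))))).contains k = true := by
          simp only [PySem.Dict.contains, List.any_append]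
          have : p.items.any (fun pr => pr.1 == k) = true := hpck
          simp [this]
        have hpar : pvParStep current (PySem.Dict.mk (p.items ++ (pvNewly t (fun x => d.contains x)).map
            (fun j => (j, ([] : List String))))) k
            = PySem.Dict.mk ((p.insert k (p.getD k [] ++ [current])).items
                ++ (pvNewly t (fun x => d.contains x)).map (fun j => (j, ([] : List String)))) := by
          unfold pvParStep
          rw [hgetPT]
          rw [if_neg (by simp [hcurm])]
          apply PySem.Dict.ext
          rw [PySem.Dict.items_insert_of_contains _ _ hPTc]
          rw [List.map_append]
          rw [PySem.Dict.items_insert_of_contains _ _ hpck]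
          congr 1
          apply pvMap_overwrite_id
          intro pr hpr
          rcases List.mem_map.1 hpr with ⟨j, hj, rfl⟩
          have := pvNewly_fresh _ _ j hj
          have hjk : j ≠ k := fun h => by rw [h, hk] at this; cases this
          simpa using hjk
        have hpk' : ∀ x, (p.insert k (p.getD k [] ++ [current])).contains x = d.contains x := by
          intro x
          rw [PySem.Dict.contains_insert]
          by_cases hxk : x = k
          · subst hxk; simp [hk]
          · have : (x == k) = false := by simp [hxk]
            simp [this, hpk x]
        rw [hstepA, hpar]
        exact ih d (p.insert k (p.getD k [] ++ [current])) q hpk'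
    · -- k freshly discovered
      have hk' : d.contains k = false := by simpa using hk
      have hpck : p.contains k = false := by rw [hpk]; exact hk'
      have hpend : pvNewly (k :: t) (fun x => d.contains x)
          = k :: pvNewly t (fun x => (d.insert k (cd + 1)).contains x) := by
        have hc : (fun x => (d.insert k (cd + 1)).contains x) = (fun x => x == k || d.contains x) := by
          funext x; exact PySem.Dict.contains_insert d k x (cd + 1)
        simp [pvNewly, hk', hc]
      have hstepA : pvStepA cd current (d, p, q) k
          = (d.insert k (cd + 1), p.insert k [current], q ++ [k]) := by
        simp [pvStepA, hk']
      have hstepB : pvStepB cd (d, q) k = (d.insert k (cd + 1), q ++ [k]) := by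
        simp [pvStepB, hk']
      set pend' := pvNewly t (fun x => (d.insert k (cd + 1)).contains x) with hpend'
      have hfreshp : ∀ j ∈ pend', (j == k) = false := by
        intro j hj
        have := pvNewly_fresh _ _ j hj
        rw [PySem.Dict.contains_insert] at this
        rcases Bool.or_eq_false_iff.1 this with ⟨h1, _⟩
        exact h1
      have hgetPT : (PySem.Dict.mk (p.items ++ (k, ([] : List String)) :: pend'.map
          (fun j => (j, ([] : List String))))).getD k [] = [] := by
        simp only [PySem.Dict.getD]
        have : p.items ++ (k, ([] : List String)) :: pend'.map (fun j => (j, ([] : List String)))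
            = p.items ++ ((k, ([] : List String)) :: pend'.map (fun j => (j, ([] : List String)))) := by simp
        rw [this, pvGet?_mk_append_right _ _ k (by rw [pvContains_mk_of_items]; exact hpck)]
        rw [PySem.Dict.get?_mk_cons]
        simp
      have hPTc : (PySem.Dict.mk (p.items ++ (k, ([] : List String)) :: pend'.map
          (fun j => (j, ([] : List String))))).contains k = true := by
        simp [PySem.Dict.contains, List.any_append]
      have hpar : pvParStep current (PySem.Dict.mk (p.items ++ (k, ([] : List String)) :: pend'.map
          (fun j => (j, ([] : List String))))) k
          = PySem.Dict.mk ((p.insert k [current]).items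
              ++ pend'.map (fun j => (j, ([] : List String)))) := by
        unfold pvParStep
        rw [hgetPT]
        simp only [List.contains_nil, Bool.false_eq_true, if_false]
        apply PySem.Dict.ext
        rw [PySem.Dict.items_insert_of_contains _ _ hPTc]
        rw [List.map_append]
        rw [pvMap_overwrite_id _ _ _ (pvNotMem_items p k hpck)]
        rw [PySem.Dict.items_insert_of_not_contains _ _ hpck]
        simp only [List.map_cons, BEq.rfl, if_pos rfl, List.nil_append]
        rw [pvMap_overwrite_id _ _ _ ?_]
        · simp
        · intro pr hpr
          rcases List.mem_map.1 hpr with ⟨j, hj, rfl⟩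
          exact hfreshp j hj
      have hpk' : ∀ x, (p.insert k [current]).contains x = (d.insert k (cd + 1)).contains x := by
        intro x
        rw [PySem.Dict.contains_insert, PySem.Dict.contains_insert, hpk x]
      simp only [List.foldl_cons, hstepA, hstepB, hpend, List.map_cons, hpar]
      have := ih (d.insert k (cd + 1)) (p.insert k [current]) (q ++ [k]) hpk'
      simpa only [hpend'] using this

lemma pvParFold_append (node : String) :
    ∀ (cs : List String) (P : PySem.Dict String (List String)) (extra : List (String × List String)),
    (∀ c ∈ cs, P.contains c = true) → (∀ pr ∈ extra, P.contains pr.1 = false) →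
    cs.foldl (pvParStep node) (PySem.Dict.mk (P.items ++ extra))
      = PySem.Dict.mk ((cs.foldl (pvParStep node) P).items ++ extra)
    ∧ (∀ x, (cs.foldl (pvParStep node) P).contains x = P.contains x) := by
  intro cs
  induction cs with
  | nil =>
    intro P extra _ _
    exact ⟨rfl, fun x => rfl⟩
  | cons c t ih =>
    intro P extra hc hx
    have hPc : P.contains c = true := hc c List.mem_cons_self
    have hget : (PySem.Dict.mk (P.items ++ extra)).getD c [] = P.getD c [] := by
      simp only [PySem.Dict.getD]
      rw [pvGet?_mk_append_left _ _ c (by rw [pvContains_mk_of_items]; exact hPc)]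
    by_cases hcur : (P.getD c []).contains node = true
    · have hcurm : node ∈ P.getD c [] := by simpa using hcur
      have h1 : pvParStep node (PySem.Dict.mk (P.items ++ extra)) c
          = PySem.Dict.mk (P.items ++ extra) := by
        unfold pvParStep
        rw [hget]
        simp [hcurm]
      have h2 : pvParStep node P c = P := by
        unfold pvParStep
        simp [hcurm]
      simp only [List.foldl_cons, h1, h2]
      exact ih P extra (fun c' hc' => hc c' (List.mem_cons_of_mem _ hc')) hx
    · have hcurm : node ∉ P.getD c [] := by simpa using hcur
      have hP'c : (PySem.Dict.mk (P.items ++ extra)).contains c = true := by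
        simp only [PySem.Dict.contains, List.any_append]
        have : P.items.any (fun pr => pr.1 == c) = true := hPc
        simp [this]
      have h2 : pvParStep node P c = P.insert c (P.getD c [] ++ [node]) := by
        unfold pvParStep
        simp [hcurm]
      have h1 : pvParStep node (PySem.Dict.mk (P.items ++ extra)) c
          = PySem.Dict.mk ((P.insert c (P.getD c [] ++ [node])).items ++ extra) := by
        unfold pvParStep
        rw [hget]
        rw [if_neg (by simp [hcurm])]
        apply PySem.Dict.ext
        rw [PySem.Dict.items_insert_of_contains _ _ hP'c]
        rw [List.map_append]
        rw [PySem.Dict.items_insert_of_contains _ _ hPc]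
        congr 1
        apply pvMap_overwrite_id
        intro pr hpr
        have := hx pr hpr
        have hne : pr.1 ≠ c := fun h => by rw [h, hPc] at this; cases this
        simpa using hne
      have hcont : ∀ x, (P.insert c (P.getD c [] ++ [node])).contains x = P.contains x := by
        intro x
        rw [PySem.Dict.contains_insert]
        by_cases hxc : x = c
        · subst hxc; simp [hPc]
        · have : (x == c) = false := by simp [hxc]
          simp [this]
      have hc' : ∀ c' ∈ t, (P.insert c (P.getD c [] ++ [node])).contains c' = true := by
        intro c' hc'
        rw [hcont]; exact hc c' (List.mem_cons_of_mem _ hc')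
      have hx' : ∀ pr ∈ extra, (P.insert c (P.getD c [] ++ [node])).contains pr.1 = false := by
        intro pr hpr
        rw [hcont]; exact hx pr hpr
      simp only [List.foldl_cons, h1, h2]
      obtain ⟨ha, hb⟩ := ih (P.insert c (P.getD c [] ++ [node])) extra hc' hx'
      exact ⟨ha, fun x => by rw [hb x, hcont]⟩

lemma pvAddParFold_append (dg : List (String × List String)) :
    ∀ (o : List String) (P : PySem.Dict String (List String)) (extra : List (String × List String)),
    (∀ n ∈ o, ∀ c ∈ pvGet dg n, P.contains c = true) → (∀ pr ∈ extra, P.contains pr.1 = false) →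
    o.foldl (pvAddPar dg) (PySem.Dict.mk (P.items ++ extra))
      = PySem.Dict.mk ((o.foldl (pvAddPar dg) P).items ++ extra)
    ∧ (∀ x, (o.foldl (pvAddPar dg) P).contains x = P.contains x) := by
  intro o
  induction o with
  | nil => intro P extra _ _; exact ⟨rfl, fun x => rfl⟩
  | cons n t ih =>
    intro P extra hc hx
    obtain ⟨h1, h2⟩ := pvParFold_append n (pvGet dg n) P extra
      (fun c hc' => hc n List.mem_cons_self c hc') hx
    have hstep : pvAddPar dg (PySem.Dict.mk (P.items ++ extra)) n
        = PySem.Dict.mk ((pvAddPar dg P n).items ++ extra) := h1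
    have h2' : ∀ x, (pvAddPar dg P n).contains x = P.contains x := h2
    simp only [List.foldl_cons]
    rw [hstep]
    obtain ⟨h3, h4⟩ := ih (pvAddPar dg P n) extra
      (fun n' hn' c hc' => by rw [h2']; exact hc n' (List.mem_cons_of_mem _ hn') c hc')
      (fun pr hpr => by rw [h2']; exact hx pr hpr)
    exact ⟨h3, fun x => by rw [h4 x, h2' x]⟩

lemma pvNodup_length_le {α : Type} [DecidableEq α] (l₁ l₂ : List α) (h : l₁.Nodup) (hs : l₁ ⊆ l₂) :
    l₁.length ≤ l₂.length := by
  calc l₁.length = l₁.toFinset.card := (List.toFinset_card_of_nodup h).symm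
    _ ≤ l₂.toFinset.card := Finset.card_le_card (fun x hx => by
        rw [List.mem_toFinset] at *; exact hs hx)
    _ ≤ l₂.length := List.toFinset_card_le l₂

lemma pvValues_foldl_insert {ν : Type} (l : List (String × ν)) :
    ∀ (d : PySem.Dict String ν) (v : ν),
    v ∈ (l.foldl (fun acc p => acc.insert p.1 p.2) d).values → v ∈ d.values ∨ v ∈ l.map Prod.snd := by
  induction l with
  | nil => intro d v hv; exact Or.inl hv
  | cons pr t ih =>
    intro d v hv
    rcases ih (d.insert pr.1 pr.2) v hv with h | h
    · rcases PySem.Dict.mem_values_insert d pr.1 pr.2 v h with rfl | h'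
      · exact Or.inr (by simp)
      · exact Or.inl h'
    · exact Or.inr (by rw [List.map_cons]; exact List.mem_cons_of_mem _ h)

lemma pvGet_sub (dg : List (String × List String)) (k c : String) (hc : c ∈ pvGet dg k) :
    c ∈ pvAllC dg := by
  unfold pvGet at hc
  rcases hget : (PySem.Dict.ofList dg).get? k with _ | v
  · rw [PySem.Dict.getD, hget] at hc; simp at hc
  · rw [PySem.Dict.getD, hget] at hc
    simp only [Option.getD_some] at hc
    have hvmem : v ∈ (PySem.Dict.ofList dg).values := by
      simp only [PySem.Dict.get?] at hget
      rcases Option.map_eq_some_iff.1 hget with ⟨pr, hfind, rfl⟩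
      have := List.mem_of_find?_eq_some hfind
      exact List.mem_map_of_mem this
    have := pvValues_foldl_insert dg PySem.Dict.empty v hvmem
    rcases this with h | h
    · simp [PySem.Dict.empty, PySem.Dict.values] at h
    · exact List.mem_flatten.2 ⟨v, h, hc⟩

lemma pvUD_step (dg : List (String × List String)) (pend : List String)
    (d d' : PySem.Dict String Int)
    (h : ∀ x, d'.contains x = (d.contains x || pend.contains x))
    (hfresh : ∀ k ∈ pend, d.contains k = false)
    (hsub : ∀ k ∈ pend, k ∈ pvAllC dg) (hnd : pend.Nodup) :
    pvUD dg d' + pend.length ≤ pvUD dg d := by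
  classical
  set xs := PySem.List.dedup (pvAllC dg) with hxs
  have h1 : xs.filter (fun c => d'.contains c = false)
      = (xs.filter (fun c => d.contains c = false)).filter (fun c => !pend.contains c) := by
    rw [List.filter_filter]
    apply List.filter_congr
    intro x _
    rw [h x]
    cases hdx : d.contains x <;> cases hpx : pend.contains x <;> simp
  have h2 : (xs.filter (fun c => d.contains c = false)).length
      = ((xs.filter (fun c => d.contains c = false)).filter (fun c => pend.contains c)).length
        + ((xs.filter (fun c => d.contains c = false)).filter (fun c => !pend.contains c)).length := by
    exact List.length_eq_length_filter_add (fun c => pend.contains c)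
  have h3 : pend.length ≤ ((xs.filter (fun c => d.contains c = false)).filter
      (fun c => pend.contains c)).length := by
    apply pvNodup_length_le _ _ hnd
    intro k hk
    rw [List.mem_filter, List.mem_filter]
    refine ⟨⟨?_, by simp [hfresh k hk]⟩, by simpa using hk⟩
    rw [hxs, PySem.List.mem_dedup]
    exact hsub k hk
  unfold pvUD
  rw [← hxs, h1]
  omega

lemma pvContains_pvInitPar (L : List String) (x : String) :
    (pvInitPar L).contains x = decide (x ∈ L) := by
  have := pvContains_foldl_insert (ν := List String) L PySem.Dict.empty (fun _ _ => []) x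
  simpa [pvInitPar, PySem.Dict.empty, PySem.Dict.contains] using this

lemma pvOuter (dg : List (String × List String)) :
    ∀ (f : Nat) (d : PySem.Dict String Int) (p : PySem.Dict String (List String)) (o q : List String),
    p = o.foldl (pvAddPar dg) (pvInitPar (o ++ q)) →
    (∀ x, p.contains x = d.contains x) →
    (∀ x, d.contains x = true ↔ x ∈ o ++ q) →
    (∀ n ∈ o, ∀ c ∈ pvGet dg n, d.contains c = true) →
    q.length + pvUD dg d ≤ f →
    pvALoop dg f d p q
      = ((pvBLoop dg f d o q).1,
         (pvBLoop dg f d o q).2.foldl (pvAddPar dg) (pvInitPar (pvBLoop dg f d o q).2)) := by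
  intro f
  induction f with
  | zero =>
    intro d p o q hP hpk hK hC hF
    have hq : q = [] := List.length_eq_zero_iff.1 (by omega)
    subst hq
    simp only [pvALoop, pvBLoop]
    simp only [List.append_nil] at hP
    rw [hP]
  | succ f ih =>
    intro d p o q hP hpk hK hC hF
    cases q with
    | nil =>
      simp only [pvALoop, pvBLoop]
      simp only [List.append_nil] at hP
      rw [hP]
    | cons current rest =>
      set cd := d.getD current 0 with hcd
      set cs := pvGet dg current with hcs
      set pend := pvNewly cs (fun x => d.contains x) with hpendd
      obtain ⟨b2, bcont⟩ := pvBFold cd cs d rest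
      obtain ⟨c1, c2, c3, c4⟩ := pvInner current cd cs d p rest hpk
      set sA := cs.foldl (pvStepA cd current) (d, p, rest) with hsA
      set sB := cs.foldl (pvStepB cd) (d, rest) with hsB
      have hfresh : ∀ k ∈ pend, d.contains k = false := fun k hk => pvNewly_fresh cs _ k hk
      have hnotinL : ∀ k ∈ pend, k ∉ o ++ current :: rest := by
        intro k hk hmem
        have := (hK k).2 hmem
        rw [hfresh k hk] at this
        cases this
      -- hP' chain
      have hinit : pvInitPar ((o ++ current :: rest) ++ pend)
          = PySem.Dict.mk ((pvInitPar (o ++ current :: rest)).items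
              ++ pend.map (fun k => (k, ([] : List String)))) := by
        unfold pvInitPar
        rw [List.foldl_append]
        exact pvFoldl_insert_fresh pend [] _
          (fun k hk => by
            have := pvContains_pvInitPar (o ++ current :: rest) k
            unfold pvInitPar at this
            rw [this]
            simpa using hnotinL k hk)
          (pvNewly_nodup cs _)
      have hfold : (o.foldl (pvAddPar dg) (pvInitPar ((o ++ current :: rest) ++ pend)))
          = PySem.Dict.mk (p.items ++ pend.map (fun k => (k, ([] : List String)))) := by
        rw [hinit]
        obtain ⟨he, _⟩ := pvAddParFold_append dg o (pvInitPar (o ++ current :: rest))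
          (pend.map (fun k => (k, ([] : List String))))
          (fun n hn c hcmem => by
            rw [pvContains_pvInitPar]
            have := hC n hn c hcmem
            rw [hK] at this
            simpa using this)
          (fun pr hpr => by
            rcases List.mem_map.1 hpr with ⟨k, hk, rfl⟩
            rw [pvContains_pvInitPar]
            simpa using hnotinL k hk)
        rw [he, ← hP]
      have hP' : sA.2.1 = (o ++ [current]).foldl (pvAddPar dg)
          (pvInitPar ((o ++ [current]) ++ sB.2)) := by
        rw [b2]
        have hL : (o ++ [current]) ++ (rest ++ pend) = (o ++ current :: rest) ++ pend := by
          simp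
        rw [hL, List.foldl_append, hfold]
        simp only [List.foldl_cons, List.foldl_nil]
        rw [← c3]
        rfl
      have hpk' : ∀ x, sA.2.1.contains x = sB.1.contains x := by
        intro x; rw [c4 x, c1]
      have hK' : ∀ x, sB.1.contains x = true ↔ x ∈ (o ++ [current]) ++ sB.2 := by
        intro x
        rw [bcont x, b2]
        simp only [List.mem_append, List.mem_singleton, List.mem_cons]
        have hKx : d.contains x = true ↔ (x ∈ o ∨ x = current ∨ x ∈ rest) := by
          rw [hK x]; simp
        constructor
        · intro h
          rcases Bool.or_eq_true_iff.1 h with h | h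
          · have := hKx.1 h; tauto
          · have : x ∈ pvNewly cs fun y => d.contains y := by simpa using h
            tauto
        · intro h
          have hd : d.contains x = true ∨ x ∈ pvNewly cs (fun y => d.contains y) := by
            have := hKx.2
            tauto
          rcases hd with h' | h'
          · rw [h']; rfl
          · have hx : (pvNewly cs fun y => d.contains y).contains x = true := by simpa using h'
            rw [hx]
            simp
      have hC' : ∀ n ∈ o ++ [current], ∀ c ∈ pvGet dg n, sB.1.contains c = true := by
        intro n hn c hcmem
        rw [bcont c]
        rcases List.mem_append.1 hn with h | h
        · rw [hC n h c hcmem]; rfl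
        · rcases List.mem_singleton.1 h with rfl
          rw [← hcs] at hcmem
          have := pvNewly_covers cs (fun x => d.contains x) c hcmem
          simpa using this
      have hF' : sB.2.length + pvUD dg sB.1 ≤ f := by
        have hud := pvUD_step dg pend d sB.1 bcont hfresh
          (fun k hk => pvGet_sub dg current k (pvNewly_sub cs _ k hk))
          (pvNewly_nodup cs _)
        have hlen : sB.2.length = rest.length + pend.length := by rw [b2]; simp; rfl
        simp only [List.length_cons] at hF
        omega
      have hstepA : pvALoop dg (f + 1) d p (current :: rest) = pvALoop dg f sA.1 sA.2.1 sA.2.2 := rfl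
      have hstepB : pvBLoop dg (f + 1) d o (current :: rest)
          = pvBLoop dg f sB.1 (o ++ [current]) sB.2 := rfl
      rw [hstepA, hstepB, c1, c2]
      exact ih sB.1 sA.2.1 (o ++ [current]) sB.2 hP' hpk' hK' hC' hF'

-- splitting A's init fold componentwise over the accepted names
lemma pvInitA_split (g : String → Bool) (dn : List String) :
    ∀ (a : PySem.Dict String Int) (b : PySem.Dict String (List String)) (c : List String),
    dn.foldl (fun s n => if g n then (s.1.insert n 0, s.2.1.insert n [], s.2.2 ++ [n]) else s) (a, b, c)
      = ((dn.filter g).foldl (fun x n => x.insert n 0) a,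
         (dn.filter g).foldl (fun x n => x.insert n []) b,
         c ++ dn.filter g) := by
  induction dn with
  | nil => intro a b c; simp
  | cons n t ih =>
    intro a b c
    by_cases hg : g n = true
    · simp only [List.foldl_cons, List.filter_cons, hg, if_pos rfl]
      rw [ih]
      simp
    · have hg' : g n = false := by simpa using hg
      simp only [List.foldl_cons, List.filter_cons, hg', Bool.false_eq_true, if_false]
      exact ih a b c

lemma pvInitB_split (g : String → Bool) (dn : List String) :
    ∀ (a : PySem.Dict String Int) (c : List String),
    dn.foldl (fun s n => if g n then (s.1.insert n 0, s.2 ++ [n]) else s) (a, c)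
      = ((dn.filter g).foldl (fun x n => x.insert n 0) a, c ++ dn.filter g) := by
  induction dn with
  | nil => intro a c; simp
  | cons n t ih =>
    intro a c
    by_cases hg : g n = true
    · simp only [List.foldl_cons, List.filter_cons, hg, if_pos rfl]
      rw [ih]
      simp
    · have hg' : g n = false := by simpa using hg
      simp only [List.foldl_cons, List.filter_cons, hg', Bool.false_eq_true, if_false]
      exact ih a c

lemma pvSetAdd_len (xs : List String) :
    ∀ (acc : PySem.Set String), (xs.foldl PySem.Set.add acc).length ≤ acc.length + xs.length := by
  induction xs with
  | nil => intro acc; simp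
  | cons x t ih =>
    intro acc
    simp only [List.foldl_cons]
    have h1 : (PySem.Set.add acc x).length ≤ acc.length + 1 := by
      unfold PySem.Set.add
      split_ifs <;> simp
    calc (t.foldl PySem.Set.add (PySem.Set.add acc x)).length
        ≤ (PySem.Set.add acc x).length + t.length := ih _
      _ ≤ acc.length + 1 + t.length := by omega
      _ = acc.length + (t.length + 1) := by omega
      _ = acc.length + (x :: t).length := by simp

lemma pvDedup_len (xs : List String) : (PySem.List.dedup xs).length ≤ xs.length := by
  rw [PySem.List.dedup_eq_ofList, PySem.Set.ofList_eq_foldl]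
  have := pvSetAdd_len xs []
  simpa using this

lemma pvFuel_fold (dg : List (String × List String)) :
    ∀ (c : Nat), dg.foldl (fun a pr => a + 1 + pr.2.length) c
      = c + dg.length + (dg.map (fun pr => pr.2.length)).sum := by
  induction dg with
  | nil => intro c; simp
  | cons pr t ih =>
    intro c
    simp only [List.foldl_cons, List.map_cons, List.sum_cons, List.length_cons]
    rw [ih]
    omega

lemma pvAllC_len (dg : List (String × List String)) :
    (pvAllC dg).length ≤ dg.foldl (fun a pr => a + 1 + pr.2.length) 0 := by
  rw [pvFuel_fold]
  unfold pvAllC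
  rw [List.length_flatten]
  simp only [List.map_map]
  have : (dg.map (List.length ∘ Prod.snd)).sum = (dg.map (fun pr => pr.2.length)).sum := by
    congr 1
  omega

lemma pvFinal (direct_names : List String) (dep_graph : List (String × List String)) :
    compute_dependency_depths_py direct_names dep_graph
      = compute_dependency_depths_py_alt direct_names dep_graph := by
  unfold compute_dependency_depths_py compute_dependency_depths_py_alt
  simp only []
  set g : String → Bool := fun n => pvMem dep_graph n || direct_names.contains n with hg
  set q0 : List String := direct_names.filter g with hq0
  set D0 : PySem.Dict String Int := q0.foldl (fun x n => x.insert n 0) PySem.Dict.empty with hD0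
  have hA := pvInitA_split g direct_names PySem.Dict.empty PySem.Dict.empty []
  have hB := pvInitB_split g direct_names PySem.Dict.empty []
  simp only [List.nil_append] at hA hB
  rw [hA, hB]
  have hDc : ∀ x, D0.contains x = decide (x ∈ q0) := by
    intro x
    have := pvContains_foldl_insert (ν := Int) q0 PySem.Dict.empty (fun _ _ => 0) x
    simpa [hD0, PySem.Dict.empty, PySem.Dict.contains] using this
  have hout := pvOuter dep_graph
    (direct_names.length + dep_graph.foldl (fun a pr => a + 1 + pr.2.length) 0)
    D0 (pvInitPar q0) [] q0
    (by simp)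
    (by intro x; rw [pvContains_pvInitPar, hDc])
    (by intro x; rw [hDc]; simp)
    (by intro n hn; cases hn)
    (by
      have h1 : q0.length ≤ direct_names.length := by
        rw [hq0]; exact List.length_filter_le _ _
      have h2 : pvUD dep_graph D0 ≤ dep_graph.foldl (fun a pr => a + 1 + pr.2.length) 0 := by
        calc pvUD dep_graph D0 ≤ (PySem.List.dedup (pvAllC dep_graph)).length :=
              List.length_filter_le _ _
          _ ≤ (pvAllC dep_graph).length := pvDedup_len _
          _ ≤ _ := pvAllC_len dep_graph
      omega)
  show ((pvALoop dep_graph _ D0 (pvInitPar q0) q0).1.items,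
        (pvALoop dep_graph _ D0 (pvInitPar q0) q0).2.items) = _
  rw [hout]

-- ===== VERDICT (by name: the statement is the Claim_ definition above) =====
theorem compute_dependency_depths_py_spec : Claim_equal_compute_dependency_depths_py := by
  intro direct_names dep_graph _
  unfold Spec_compute_dependency_depths_py
  exact pvFinal direct_names dep_graph
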